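-- pv_equiv track=rewrite | github.com/icearl/Data-Structures-Algorithm-Analysis | Python/target_offer/09_变态跳台阶.py | jumpFloorII
-- ===== SOURCE A (Python) =====
-- def jumpFloorII(number):
--     # write code here
--     a = [1, 1]
--     if number == 0:
--         return 1
--     elif number == 1:
--         return 1
--     else:
--         for i in range(2, number+1):
--             a.append(2 * a[i-1])
--     return a[number]
-- ===== SOURCE B (Python) =====
-- def jumpFloorII(number):
--     # Closed form: with steps of every length allowed, f(n) = 2**(n-1); f(n) = 1 for n <= 1.
--     if number <= 1:
--         return 1
--     return 1 << (number - 1)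
-- ===== Notes on version B (the rewrite author's own statement) =====
-- stated objective: faster
-- what changed: Replaces the list-building loop (append 2*a[i-1] up to index n, then read a[n]) by the closed form 2^(n-1) computed as a single bit shift, with 1 for n <= 1.
-- crash fix: For number <= -3 A raises IndexError (negative-index read past the two seed elements); B returns 1, the natural value for non-positive n. — e.g. on jumpFloorII(-3): A raises IndexError, B returns 1
import Mathlib
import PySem

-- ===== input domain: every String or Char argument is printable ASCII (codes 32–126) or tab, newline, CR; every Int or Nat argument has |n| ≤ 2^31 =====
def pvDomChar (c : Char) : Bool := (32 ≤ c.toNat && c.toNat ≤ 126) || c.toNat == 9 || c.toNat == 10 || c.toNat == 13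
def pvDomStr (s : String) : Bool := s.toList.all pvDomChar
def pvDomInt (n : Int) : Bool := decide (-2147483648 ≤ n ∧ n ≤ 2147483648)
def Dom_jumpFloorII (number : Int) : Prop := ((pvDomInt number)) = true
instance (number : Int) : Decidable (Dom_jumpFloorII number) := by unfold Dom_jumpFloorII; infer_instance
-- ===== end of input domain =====

-- ===== PORT A =====
-- Literal port of A: build a = [1,1], append 2*a[i-1] for i in range(2, number+1), return a[number].
-- a[number] is read with pyGet? (negative Python index from the end); Python raises IndexError where
-- it yields none — those inputs (number <= -3) are excluded by Pre_, so .getD 0 is never the result.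
def jumpFloorII (number : Int) : Int :=
  let a : List Int := [1, 1]
  if number == 0 then 1
  else if number == 1 then 1
  else
    let a := (PySem.List.pyRange 2 (number + 1) 1).foldl
      (fun acc i => acc ++ [2 * (PySem.List.pyGetD acc (i - 1) 0)]) a
    (PySem.List.pyGet? a number).getD 0

-- ===== PORT B =====
-- Port of B: 1 for number <= 1, otherwise 1 << (number-1), i.e. 2 ^ (number-1).
def jumpFloorII_alt (number : Int) : Int :=
  if number ≤ 1 then 1 else 2 ^ (number - 1).toNat

-- ===== PRECONDITION & SPEC =====
-- Pre_ excludes exactly the inputs (number <= -3) on which A raises IndexError.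
def Pre_jumpFloorII (number : Int) : Prop := -2 ≤ number
instance (number : Int) : Decidable (Pre_jumpFloorII number) := by unfold Pre_jumpFloorII; infer_instance
def pvWitness_jumpFloorII : Int := 5
-- For number <= -3 A raises IndexError (negative-index read past the two seed elements); B returns 1.
def Raises_jumpFloorII (number : Int) : Prop := number ≤ -3
instance (number : Int) : Decidable (Raises_jumpFloorII number) := by unfold Raises_jumpFloorII; infer_instance
def pvRaiseWitness_jumpFloorII : Int := -3
def pvRaiseWitnessOut_jumpFloorII : Int := 1
def Spec_jumpFloorII (number : Int) (out : Int) : Prop := out = jumpFloorII_alt number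
instance (number : Int) (out : Int) : Decidable (Spec_jumpFloorII number out) := by unfold Spec_jumpFloorII; infer_instance

-- ===== CLAIM (what is proved, stated in full; the proofs are below) =====
def Claim_equal_jumpFloorII : Prop := ∀ (number : Int), Dom_jumpFloorII number → Pre_jumpFloorII number → Spec_jumpFloorII number (jumpFloorII number)
def Claim_raises_jumpFloorII : Prop := (∀ (number : Int), Dom_jumpFloorII number → Raises_jumpFloorII number → ¬ Pre_jumpFloorII number) ∧ (Dom_jumpFloorII (pvRaiseWitness_jumpFloorII) ∧ Raises_jumpFloorII (pvRaiseWitness_jumpFloorII) ∧ jumpFloorII_alt (pvRaiseWitness_jumpFloorII) = pvRaiseWitnessOut_jumpFloorII)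

-- ===== LEMMAS AND PROOFS =====
-- Loop invariant: after running the loop up to n (n ≥ 1) the list is 1 :: [2^0, 2^1, …, 2^(n-1)].
theorem jumpFloorII_loop (n : Nat) (hn : 1 ≤ n) :
    (PySem.List.pyRange 2 ((n : Int) + 1) 1).foldl
      (fun acc i => acc ++ [2 * (PySem.List.pyGetD acc (i - 1) 0)]) [1, 1]
    = 1 :: (List.range n).map (fun k => (2 : Int) ^ k) := by
  induction n with
  | zero => omega
  | succ m ih =>
    rcases Nat.lt_or_ge m 1 with hm | hm
    · interval_cases m
      rw [PySem.List.pyRange_one_eq_nil (by omega)]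
      decide
    · rw [show ((m + 1 : Nat) : Int) + 1 = ((m : Int) + 1) + 1 by push_cast; ring,
        PySem.List.pyRange_one_succ_right (by omega), List.foldl_append, ih hm]
      simp only [List.foldl_cons, List.foldl_nil]
      have hidx : ((m : Int) + 1 - 1) = ((m : Nat) : Int) := by ring
      rw [hidx, PySem.List.pyGetD_natCast]
      have hlen : ((List.range m).map (fun k => (2 : Int) ^ k)).length = m := by simp
      have : (1 :: (List.range m).map (fun k => (2 : Int) ^ k)).getD m 0 = (2 : Int) ^ (m - 1) := by
        rcases Nat.exists_eq_add_of_le hm with ⟨j, rfl⟩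
        simp [List.getD]
        rw [show 1 + j = j + 1 from by omega]
        simp
      rw [this, List.range_succ]
      rcases Nat.exists_eq_add_of_le hm with ⟨j, rfl⟩
      simp
      rw [show 1 + j = j + 1 from by omega, pow_succ]
      ring

-- ===== VERDICT (by name: the statement is the Claim_ definition above) =====
theorem jumpFloorII_spec : Claim_equal_jumpFloorII := by
  intro number _ hpre
  unfold Spec_jumpFloorII jumpFloorII jumpFloorII_alt
  by_cases h1 : number ≤ 1
  · unfold Pre_jumpFloorII at hpre
    interval_cases number <;> decide
  · rw [not_le] at h1
    have h0 : number ≠ 0 := by omega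
    have h1' : number ≠ 1 := by omega
    simp only [beq_iff_eq, h0, h1', if_false, if_neg (by omega : ¬ number ≤ 1)]
    obtain ⟨n, rfl⟩ : ∃ n : Nat, number = (n : Int) :=
      ⟨number.toNat, (Int.toNat_of_nonneg (by omega)).symm⟩
    have hn : 2 ≤ n := by exact_mod_cast h1
    rw [jumpFloorII_loop n (by omega), PySem.List.pyGet?_natCast]
    rcases Nat.exists_eq_add_of_le hn with ⟨j, rfl⟩
    have : ((2 : Int) + j - 1).toNat = j + 1 := by omega
    simp [List.range_succ, Nat.add_comm 2 j]
    omega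

@[simp] theorem jumpFloorII_raises : Claim_raises_jumpFloorII := by
  unfold Claim_raises_jumpFloorII
  exact ⟨fun number _ hr => by unfold Raises_jumpFloorII Pre_jumpFloorII at *; omega, by decide⟩
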